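-- pv_equiv track=rewrite | github.com/Muhammadomer902/LeetCode | 1033-moving-stones-until-consecutive/1033-moving-stones-until-consecutive.py | numMovesStones
-- ===== SOURCE A (Python) =====
-- def numMovesStones(a, b, c):
--     """
--     :type a: int
--     :type b: int
--     :type c: int
--     :rtype: List[int]
--     """
--     while a>b or b>c:
--         if a>b and a>c:
--             a,c=c,a
--         elif a>b and a<c:
--             a,b=b,a
--         elif a<b and a>c:
--             a,c=c,a
--             b,c=c,b
--         elif b>c:
--             b,c=c,b
--
--     if a+1==b and b+1==c:
--         return [0,0]
--     elif a+1==b: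
--         return [1,c-b-1]
--     elif a+2==b:
--         return [1,b-a-1+c-b-1]
--     elif b+1==c:
--         return [1, b-a-1]
--     elif b+2==c:
--         return [1,b-a-1+c-b-1]
--     else:
--         return[2, b-a-1+c-b-1]
-- ===== SOURCE B (Python) =====
-- def numMovesStones(a, b, c):
--     stones = (a, b, c)
--     # sliding-window count: best number of stones inside any length-3 window
--     # anchored at a stone; min moves = 3 - best, max moves = empty cells in the span
--     def near(w):
--         return sum(1 for t in stones if w <= t <= w + 2)
--     best = max(near(a), near(b), near(c))
--     return [3 - best, max(stones) - min(stones) - 2]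
-- ===== Notes on version B (the rewrite author's own statement) =====
-- stated objective: alternative
-- what changed: Replaces A's hand-written swap loop plus five-way gap casework by a sort-free sliding-window algorithm: min moves = 3 minus the largest number of stones in any length-3 window anchored at a stone, max moves = max-min-2 via builtins.
-- outside the precondition, e.g. on numMovesStones(2, 1, 2): A does not finish within the time limit, B returns [0, -1]; on numMovesStones(1, 1, 4): A returns [2, 1], B returns [1, 1]; on numMovesStones(1, 1, 1): A returns [2, -2], B returns [0, -2]
import Mathlib
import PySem

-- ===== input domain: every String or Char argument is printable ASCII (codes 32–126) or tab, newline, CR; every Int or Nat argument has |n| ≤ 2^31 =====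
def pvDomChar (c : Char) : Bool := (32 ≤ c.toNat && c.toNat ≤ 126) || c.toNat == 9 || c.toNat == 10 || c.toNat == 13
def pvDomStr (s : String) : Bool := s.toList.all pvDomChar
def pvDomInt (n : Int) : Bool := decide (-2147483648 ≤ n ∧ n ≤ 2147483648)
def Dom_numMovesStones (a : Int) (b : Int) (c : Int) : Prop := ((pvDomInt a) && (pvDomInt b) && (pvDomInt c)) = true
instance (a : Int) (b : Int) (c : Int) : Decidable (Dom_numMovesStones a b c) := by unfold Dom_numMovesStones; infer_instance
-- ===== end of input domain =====

-- B replaces A's swap loop + five-way gap casework by a sliding-window count (min moves =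
-- 3 minus the most stones any length-3 window anchored at a stone contains; max moves =
-- empty cells in the span), with no sorting at all (objective: alternative). Equal return
-- values proved on pairwise-distinct stones (Pre_).

-- ===== PORT A =====
-- the while loop of A, step for step (same guards, same swaps), run on a fuel of 4:
-- each iteration removes at least one inverted pair (there are at most 3), so on every
-- input where Python's loop exits at all, 4 steps are enough; on the inputs where the
-- loop never exits (they need a = c and are outside Pre_numMovesStones) the result is
-- irrelevant
def pvSortLoop (a b c : Int) : Nat → Int × Int × Int
  | 0 => (a, b, c)
  | Nat.succ n =>
    if a > b ∨ b > c then
      if a > b ∧ a > c then pvSortLoop c b a n            -- a,c = c,a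
      else if a > b ∧ a < c then pvSortLoop b a c n       -- a,b = b,a
      else if a < b ∧ a > c then pvSortLoop c a b n       -- a,c = c,a; b,c = c,b
      else if b > c then pvSortLoop a c b n               -- b,c = c,b
      else (a, b, c)
    else (a, b, c)

def numMovesStones (a : Int) (b : Int) (c : Int) : List Int :=
  match pvSortLoop a b c 4 with
  | (a, b, c) =>
    if a + 1 = b ∧ b + 1 = c then [0, 0]
    else if a + 1 = b then [1, c - b - 1]
    else if a + 2 = b then [1, b - a - 1 + (c - b - 1)]
    else if b + 1 = c then [1, b - a - 1]
    else if b + 2 = c then [1, b - a - 1 + (c - b - 1)]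
    else [2, b - a - 1 + (c - b - 1)]

-- ===== PORT B =====
-- near w = sum(1 for t in stones if w <= t <= w + 2)
def pvNear (a b c w : Int) : Int :=
  List.foldl (fun acc t => if w ≤ t ∧ t ≤ w + 2 then acc + 1 else acc) 0 [a, b, c]

def numMovesStones_alt (a : Int) (b : Int) (c : Int) : List Int :=
  let best := max (pvNear a b c a) (max (pvNear a b c b) (pvNear a b c c))
  [3 - best, max a (max b c) - min a (min b c) - 2]

-- ===== PRECONDITION & SPEC =====
-- Pre_ excludes non-distinct stone positions (the LeetCode problem places three stones at
-- distinct positions): on some duplicate inputs A's while loop never terminates (e.g. (2,1,2)),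
-- and on the rest A's branch arithmetic returns accidental values (e.g. [2,1] on (1,1,4)).
def Pre_numMovesStones (a : Int) (b : Int) (c : Int) : Prop := a ≠ b ∧ a ≠ c ∧ b ≠ c
instance (a : Int) (b : Int) (c : Int) : Decidable (Pre_numMovesStones a b c) := by
  unfold Pre_numMovesStones; infer_instance

def pvWitness_numMovesStones : Int × Int × Int := (1, 5, 3)

def Spec_numMovesStones (a : Int) (b : Int) (c : Int) (out : List Int) : Prop := out = numMovesStones_alt a b c
instance (a : Int) (b : Int) (c : Int) (out : List Int) : Decidable (Spec_numMovesStones a b c out) := by unfold Spec_numMovesStones; infer_instance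

-- ===== CLAIM (what is proved, stated in full; the proofs are below) =====
def Claim_equal_numMovesStones : Prop := ∀ (a : Int) (b : Int) (c : Int), Dom_numMovesStones a b c → Pre_numMovesStones a b c → Spec_numMovesStones a b c (numMovesStones a b c)

-- ===== LEMMAS AND PROOFS =====
-- one unfolding of the loop body
lemma pvSortLoop_succ (a b c : Int) (n : Nat) :
    pvSortLoop a b c (n + 1)
      = if a > b ∨ b > c then
          if a > b ∧ a > c then pvSortLoop c b a n
          else if a > b ∧ a < c then pvSortLoop b a c n
          else if a < b ∧ a > c then pvSortLoop c a b n
          else if b > c then pvSortLoop a c b n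
          else (a, b, c)
        else (a, b, c) := rfl

-- A's loop on an already sorted triple exits at once (any fuel)
lemma pvSortLoop_sorted (x y z : Int) (n : Nat) (h1 : x < y) (h2 : y < z) :
    pvSortLoop x y z n = (x, y, z) := by
  cases n with
  | zero => rfl
  | succ n => rw [pvSortLoop_succ, if_neg (by omega : ¬(x > y ∨ y > z))]

-- the near-count is a function of the stone multiset: swapping stones leaves it unchanged
lemma pvNear_swap01 (a b c w : Int) : pvNear a b c w = pvNear b a c w := by
  simp only [pvNear, List.foldl]; split_ifs <;> omega

lemma pvNear_swap12 (a b c w : Int) : pvNear a b c w = pvNear a c b w := by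
  simp only [pvNear, List.foldl]; split_ifs <;> omega

-- hence B's whole result is invariant under swapping its arguments
lemma alt_swap01 (a b c : Int) : numMovesStones_alt a b c = numMovesStones_alt b a c := by
  simp only [numMovesStones_alt, List.cons.injEq, and_true]
  rw [pvNear_swap01 a b c a, pvNear_swap01 a b c b, pvNear_swap01 a b c c]
  constructor <;> omega

lemma alt_swap12 (a b c : Int) : numMovesStones_alt a b c = numMovesStones_alt a c b := by
  simp only [numMovesStones_alt, List.cons.injEq, and_true]
  rw [pvNear_swap12 a b c a, pvNear_swap12 a b c b, pvNear_swap12 a b c c]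
  constructor <;> omega

-- the near-count written as a sum of three indicators
lemma pvNear_eval (a b c w : Int) :
    pvNear a b c w = (if w ≤ a ∧ a ≤ w + 2 then 1 else 0) + (if w ≤ b ∧ b ≤ w + 2 then 1 else 0)
      + (if w ≤ c ∧ c ≤ w + 2 then (1 : Int) else 0) := by
  simp only [pvNear, List.foldl]; split_ifs <;> omega

-- B evaluated on a strictly sorted triple
lemma alt_sorted (x y z : Int) (h1 : x < y) (h2 : y < z) :
    numMovesStones_alt x y z
      = [if z - x = 2 then (0 : Int) else if y - x ≤ 2 ∨ z - y ≤ 2 then 1 else 2, z - x - 2] := by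
  have e1 : pvNear x y z x = 1 + (if y ≤ x + 2 then 1 else 0) + (if z ≤ x + 2 then 1 else 0) := by
    rw [pvNear_eval]; split_ifs <;> omega
  have e2 : pvNear x y z y = 1 + (if z ≤ y + 2 then 1 else 0) := by
    rw [pvNear_eval]; split_ifs <;> omega
  have e3 : pvNear x y z z = 1 := by
    rw [pvNear_eval]; split_ifs <;> omega
  simp only [numMovesStones_alt, e1, e2, e3, List.cons.injEq, and_true]
  constructor
  · split_ifs <;> omega
  · omega

-- branch arithmetic of A equals the same closed forms on a sorted strict triple
lemma branches_eq (x y z : Int) (h1 : x < y) (h2 : y < z) :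
    (if x + 1 = y ∧ y + 1 = z then ([0, 0] : List Int)
     else if x + 1 = y then [1, z - y - 1]
     else if x + 2 = y then [1, y - x - 1 + (z - y - 1)]
     else if y + 1 = z then [1, y - x - 1]
     else if y + 2 = z then [1, y - x - 1 + (z - y - 1)]
     else [2, y - x - 1 + (z - y - 1)])
    = [if z - x = 2 then (0 : Int) else if y - x ≤ 2 ∨ z - y ≤ 2 then 1 else 2, z - x - 2] := by
  split_ifs <;> simp_all <;> omega

-- ===== VERDICT (by name: the statement is the Claim_ definition above) =====
theorem numMovesStones_spec : Claim_equal_numMovesStones := by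
  intro a b c _ hpre
  obtain ⟨hab, hac, hbc⟩ := hpre
  unfold Spec_numMovesStones numMovesStones
  rcases lt_or_gt_of_ne hab with h1 | h1 <;>
    rcases lt_or_gt_of_ne hac with h2 | h2 <;>
    rcases lt_or_gt_of_ne hbc with h3 | h3
  · -- a < b < c : loop exits at once
    rw [pvSortLoop_sorted a b c 4 h1 h3]
    exact (branches_eq a b c h1 h3).trans (alt_sorted a b c h1 h3).symm
  · -- a < c < b : last branch then done
    rw [pvSortLoop_succ, if_pos (by omega : a > b ∨ b > c),
        if_neg (by omega : ¬(a > b ∧ a > c)), if_neg (by omega : ¬(a > b ∧ a < c)),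
        if_neg (by omega : ¬(a < b ∧ a > c)), if_pos h3,
        pvSortLoop_sorted a c b 3 h2 h3,
        alt_swap12 a b c]
    exact (branches_eq a c b h2 h3).trans (alt_sorted a c b h2 h3).symm
  · -- a < b, a > c, b < c : impossible
    omega
  · -- c < a < b : third branch
    rw [pvSortLoop_succ, if_pos (by omega : a > b ∨ b > c),
        if_neg (by omega : ¬(a > b ∧ a > c)), if_neg (by omega : ¬(a > b ∧ a < c)),
        if_pos (⟨h1, h2⟩ : a < b ∧ a > c),
        pvSortLoop_sorted c a b 3 h2 h1,
        alt_swap12 a b c, alt_swap01 a c b]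
    exact (branches_eq c a b h2 h1).trans (alt_sorted c a b h2 h1).symm
  · -- b < a < c : second branch
    rw [pvSortLoop_succ, if_pos (by omega : a > b ∨ b > c),
        if_neg (by omega : ¬(a > b ∧ a > c)), if_pos (⟨h1, h2⟩ : a > b ∧ a < c),
        pvSortLoop_sorted b a c 3 h1 h2,
        alt_swap01 a b c]
    exact (branches_eq b a c h1 h2).trans (alt_sorted b a c h1 h2).symm
  · -- b < a, a < c, b > c : impossible
    omega
  · -- b < c < a : first branch, then second
    rw [pvSortLoop_succ, if_pos (by omega : a > b ∨ b > c), if_pos (⟨h1, h2⟩ : a > b ∧ a > c),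
        pvSortLoop_succ, if_pos (by omega : c > b ∨ b > a),
        if_neg (by omega : ¬(c > b ∧ c > a)), if_pos (⟨(by omega : c > b), h2⟩ : c > b ∧ c < a),
        pvSortLoop_sorted b c a 2 h3 h2,
        alt_swap01 a b c, alt_swap12 b a c]
    exact (branches_eq b c a h3 h2).trans (alt_sorted b c a h3 h2).symm
  · -- c < b < a : first branch then done
    rw [pvSortLoop_succ, if_pos (by omega : a > b ∨ b > c), if_pos (⟨h1, h2⟩ : a > b ∧ a > c),
        pvSortLoop_sorted c b a 3 h3 h1,
        alt_swap12 a b c, alt_swap01 a c b, alt_swap12 c a b]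
    exact (branches_eq c b a h3 h1).trans (alt_sorted c b a h3 h1).symm
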